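-- pv_equiv track=rewrite | github.com/sidscorp/investigative-reports | scripts/analyze_identifiability.py | classify_identifiability
-- ===== SOURCE A (Python) =====
-- def classify_identifiability(columns: list[str]) -> str:
--     """Classify identifiability tier based on columns present."""
--     has_name = any(c in columns for c in ["PROVIDER_NAME", "BILLING_NAME", "INDIVIDUAL_NAME",
--                                             "LASTNAME", "OFFICIAL_NAME", "VANISHED_ORG_NAME"])
--     has_npi = any(c in columns for c in ["BILLING_PROVIDER_NPI_NUM", "NPI", "INDIVIDUAL_NPI", "VANISHED_NPI"])
--     has_address = any(c in columns for c in ["ADDRESS", "NEW_ADDRESS"])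
--
--     if has_name and has_npi:
--         return "DIRECT"
--     elif has_address or has_npi:
--         return "QUASI"
--     else:
--         return "AGGREGATE"
-- ===== SOURCE B (Python) =====
-- NAME_COLS = frozenset(["PROVIDER_NAME", "BILLING_NAME", "INDIVIDUAL_NAME",
--                        "LASTNAME", "OFFICIAL_NAME", "VANISHED_ORG_NAME"])
-- NPI_COLS = frozenset(["BILLING_PROVIDER_NPI_NUM", "NPI", "INDIVIDUAL_NPI", "VANISHED_NPI"])
-- ADDRESS_COLS = frozenset(["ADDRESS", "NEW_ADDRESS"])
--
-- def classify_identifiability(columns: list[str]) -> str: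
--     """Classify identifiability tier based on columns present."""
--     has_name = has_npi = has_address = False
--     for c in columns:
--         if c in NAME_COLS:
--             has_name = True
--         elif c in NPI_COLS:
--             has_npi = True
--         elif c in ADDRESS_COLS:
--             has_address = True
--     if has_name and has_npi:
--         return "DIRECT"
--     elif has_address or has_npi:
--         return "QUASI"
--     else:
--         return "AGGREGATE"
-- ===== Notes on version B (the rewrite author's own statement) =====
-- stated objective: alternative
-- what changed: Inverted the traversal: instead of three keyword-driven any-scans over columns (one per keyword list), B makes a single column-driven pass, classifying each column against precomputed keyword sets and OR-ing three flags; branching on the flags is unchanged.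
import Mathlib
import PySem

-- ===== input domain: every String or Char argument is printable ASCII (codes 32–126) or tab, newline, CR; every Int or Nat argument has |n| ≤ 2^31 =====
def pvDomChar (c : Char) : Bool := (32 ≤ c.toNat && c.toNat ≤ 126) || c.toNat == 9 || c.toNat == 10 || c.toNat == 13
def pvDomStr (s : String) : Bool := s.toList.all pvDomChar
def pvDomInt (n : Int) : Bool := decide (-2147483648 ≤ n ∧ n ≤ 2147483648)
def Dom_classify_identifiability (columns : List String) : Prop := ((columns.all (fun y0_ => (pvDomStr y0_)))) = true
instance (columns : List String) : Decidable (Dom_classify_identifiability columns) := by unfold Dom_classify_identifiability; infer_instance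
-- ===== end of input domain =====

-- B inverts the traversal: one column-driven pass OR-ing three flags via keyword sets,
-- instead of A's three keyword-driven any-scans over columns; same final branching (alternative, not faster).

-- ===== PORT A =====
def classify_identifiability (columns : List String) : String :=
  let has_name := ["PROVIDER_NAME", "BILLING_NAME", "INDIVIDUAL_NAME",
                   "LASTNAME", "OFFICIAL_NAME", "VANISHED_ORG_NAME"].any
                    (fun c => columns.contains c)
  let has_npi := ["BILLING_PROVIDER_NPI_NUM", "NPI", "INDIVIDUAL_NPI", "VANISHED_NPI"].any
                    (fun c => columns.contains c)
  let has_address := ["ADDRESS", "NEW_ADDRESS"].any (fun c => columns.contains c)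
  if has_name && has_npi then "DIRECT"
  else if has_address || has_npi then "QUASI"
  else "AGGREGATE"

-- ===== PORT B =====
def nameCols : PySem.Set String :=
  PySem.Set.ofList ["PROVIDER_NAME", "BILLING_NAME", "INDIVIDUAL_NAME",
                    "LASTNAME", "OFFICIAL_NAME", "VANISHED_ORG_NAME"]
def npiCols : PySem.Set String :=
  PySem.Set.ofList ["BILLING_PROVIDER_NPI_NUM", "NPI", "INDIVIDUAL_NPI", "VANISHED_NPI"]
def addressCols : PySem.Set String :=
  PySem.Set.ofList ["ADDRESS", "NEW_ADDRESS"]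

def classify_identifiability_alt (columns : List String) : String :=
  let flags := columns.foldl
    (fun (st : Bool × Bool × Bool) c =>
      if PySem.Set.contains nameCols c then (true, st.2.1, st.2.2)
      else if PySem.Set.contains npiCols c then (st.1, true, st.2.2)
      else if PySem.Set.contains addressCols c then (st.1, st.2.1, true)
      else st)
    (false, false, false)
  if flags.1 && flags.2.1 then "DIRECT"
  else if flags.2.2 || flags.2.1 then "QUASI"
  else "AGGREGATE"

-- ===== PRECONDITION & SPEC =====
def Spec_classify_identifiability (columns : List String) (out : String) : Prop := out = classify_identifiability_alt columns
instance (columns : List String) (out : String) : Decidable (Spec_classify_identifiability columns out) := by unfold Spec_classify_identifiability; infer_instance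

-- ===== CLAIM (what is proved, stated in full; the proofs are below) =====
def Claim_equal_classify_identifiability : Prop := ∀ (columns : List String), Dom_classify_identifiability columns → Spec_classify_identifiability columns (classify_identifiability columns)

-- ===== LEMMAS AND PROOFS =====

-- the single pass computes: has_name, has_npi-and-not-name, has_address-and-neither
theorem foldl_flags (columns : List String) (st : Bool × Bool × Bool) :
    columns.foldl
      (fun (st : Bool × Bool × Bool) c =>
        if PySem.Set.contains nameCols c then (true, st.2.1, st.2.2)
        else if PySem.Set.contains npiCols c then (st.1, true, st.2.2)
        else if PySem.Set.contains addressCols c then (st.1, st.2.1, true)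
        else st)
      st
    = (st.1 || columns.any (fun c => PySem.Set.contains nameCols c),
       st.2.1 || columns.any (fun c => !PySem.Set.contains nameCols c && PySem.Set.contains npiCols c),
       st.2.2 || columns.any (fun c => !PySem.Set.contains nameCols c && !PySem.Set.contains npiCols c && PySem.Set.contains addressCols c)) := by
  induction columns generalizing st with
  | nil => simp
  | cons c cs ih =>
    simp only [List.foldl_cons, List.any_cons, ih]
    by_cases h1 : c ∈ nameCols <;>
      by_cases h2 : c ∈ npiCols <;>
        by_cases h3 : c ∈ addressCols <;>
          simp [h1, h2, h3, PySem.Set.contains]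

theorem nameCols_eq : nameCols = ["PROVIDER_NAME", "BILLING_NAME", "INDIVIDUAL_NAME",
    "LASTNAME", "OFFICIAL_NAME", "VANISHED_ORG_NAME"] := by decide

theorem npiCols_eq : npiCols = ["BILLING_PROVIDER_NPI_NUM", "NPI", "INDIVIDUAL_NPI", "VANISHED_NPI"] := by decide

theorem addressCols_eq : addressCols = ["ADDRESS", "NEW_ADDRESS"] := by decide

theorem any_contains_comm (kws columns : List String) :
    kws.any (fun c => columns.contains c) = columns.any (fun c => kws.contains c) := by
  rw [Bool.eq_iff_iff]
  simp only [List.any_eq_true, List.contains_iff_mem]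
  exact ⟨fun ⟨k, hk, hc⟩ => ⟨k, hc, hk⟩, fun ⟨k, hc, hk⟩ => ⟨k, hk, hc⟩⟩

-- the keyword sets are pairwise disjoint, so the elif-guards are redundant
theorem npi_guard (c : String) :
    (!nameCols.contains c && npiCols.contains c) = npiCols.contains c := by
  cases hn : npiCols.contains c with
  | false => simp
  | true =>
    have hc : c ∈ npiCols := by simpa [List.contains_iff_mem] using hn
    rw [npiCols_eq] at hc
    simp only [List.mem_cons, List.not_mem_nil, or_false] at hc
    rcases hc with rfl | rfl | rfl | rfl <;> decide

theorem addr_guard (c : String) :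
    (!nameCols.contains c && (!npiCols.contains c && addressCols.contains c))
      = addressCols.contains c := by
  cases ha : addressCols.contains c with
  | false => simp
  | true =>
    have hc : c ∈ addressCols := by simpa [List.contains_iff_mem] using ha
    rw [addressCols_eq] at hc
    simp only [List.mem_cons, List.not_mem_nil, or_false] at hc
    rcases hc with rfl | rfl <;> decide


-- ===== VERDICT (by name: the statement is the Claim_ definition above) =====
theorem classify_identifiability_spec : Claim_equal_classify_identifiability := by
  intro columns _
  unfold Spec_classify_identifiability classify_identifiability classify_identifiability_alt
  simp only [foldl_flags, Bool.false_or, Bool.and_assoc, npi_guard, addr_guard,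
    ← nameCols_eq, ← npiCols_eq, ← addressCols_eq]
  rw [any_contains_comm nameCols columns, any_contains_comm npiCols columns,
    any_contains_comm addressCols columns]
  rfl
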